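-- pv_equiv track=rewrite | github.com/taifu/aoc | 2021/18/day_18.py | find_digit
-- ===== SOURCE A (Python) =====
-- def find_digit(snailfish, left=True):
--     start, mult = (1, -1) if left else (0, 1)
--     pos_digit = None
--     for pos in range(start, len(snailfish)):
--         if snailfish[pos * mult].isdigit():
--             pos_digit = pos
--         elif pos_digit is not None:
--             break
--     return pos_digit
-- ===== SOURCE B (Python) =====
-- def find_digit(snailfish, left=True):
--     # Filter-then-gap: first materialize the list of digit positions in scan
--     # order, then return the position just before the first gap (the far edge
--     # of the first contiguous digit run), or the last position if gapless.
--     start, mult = (1, -1) if left else (0, 1)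
--     ds = [p for p in range(start, len(snailfish)) if snailfish[p * mult].isdigit()]
--     if not ds:
--         return None
--     for a, b in zip(ds, ds[1:]):
--         if b != a + 1:
--             return a
--     return ds[-1]
-- ===== Notes on version B (the rewrite author's own statement) =====
-- stated objective: alternative
-- what changed: A's flag-and-break scan with mutable state is replaced by a filter-then-gap pipeline: first a comprehension materializes all digit positions in scan order, then a pass over adjacent pairs of that index list returns the position before the first gap (or its last element).
import Mathlib
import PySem

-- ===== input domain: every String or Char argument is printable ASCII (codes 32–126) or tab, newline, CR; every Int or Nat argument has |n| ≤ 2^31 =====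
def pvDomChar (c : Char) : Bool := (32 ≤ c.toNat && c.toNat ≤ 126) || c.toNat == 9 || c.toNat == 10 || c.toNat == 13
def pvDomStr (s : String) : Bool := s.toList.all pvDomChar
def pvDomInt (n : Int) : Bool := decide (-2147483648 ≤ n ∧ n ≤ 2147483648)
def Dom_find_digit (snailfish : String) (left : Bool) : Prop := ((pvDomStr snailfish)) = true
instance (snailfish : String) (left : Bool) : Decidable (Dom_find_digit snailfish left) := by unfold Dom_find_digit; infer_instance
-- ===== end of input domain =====

-- B replaces A's stateful flag-and-break scan by a filter-then-gap pipeline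
-- (collect all digit positions, then return the one before the first gap);
-- objective: alternative decomposition, same cost.

-- ===== PORT A =====
-- the for-loop with `pos_digit` state and `break`; index snailfish[pos*mult] is always
-- in range for pos in range(start, len), so the `.getD ' '` default is never used
def pvLoopA (s : List Char) (mult : Int) : List Int → Option Int → Option Int
  | [], posd => posd
  | p :: rest, posd =>
    if PySem.Chars.isdigit ((PySem.List.pyGet? s (p * mult)).getD ' ') then
      pvLoopA s mult rest (some p)
    else if posd.isSome then posd
    else pvLoopA s mult rest posd

def find_digit (snailfish : String) (left : Bool) : Option Int :=
  let s := snailfish.toList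
  let start : Int := if left then 1 else 0
  let mult : Int := if left then -1 else 1
  pvLoopA s mult (PySem.List.pyRange start (s.length : Int) 1) none

-- ===== PORT B =====
-- for (a, b) in zip(ds, ds[1:]): if b != a + 1: return a  — and ds[-1] when no gap;
-- folding the zip pairing into structural recursion on the list
def pvFirstGap : Int → List Int → Int
  | a, [] => a
  | a, b :: rest => if b ≠ a + 1 then a else pvFirstGap b rest

def find_digit_alt (snailfish : String) (left : Bool) : Option Int :=
  let s := snailfish.toList
  let start : Int := if left then 1 else 0
  let mult : Int := if left then -1 else 1
  let ds := (PySem.List.pyRange start (s.length : Int) 1).filter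
      (fun p => PySem.Chars.isdigit ((PySem.List.pyGet? s (p * mult)).getD ' '))
  match ds with
  | [] => none
  | a :: rest => some (pvFirstGap a rest)

-- ===== PRECONDITION & SPEC =====
def Spec_find_digit (snailfish : String) (left : Bool) (out : Option Int) : Prop := out = find_digit_alt snailfish left
instance (snailfish : String) (left : Bool) (out : Option Int) : Decidable (Spec_find_digit snailfish left out) := by unfold Spec_find_digit; infer_instance

-- ===== CLAIM (what is proved, stated in full; the proofs are below) =====
def Claim_equal_find_digit : Prop := ∀ (snailfish : String) (left : Bool), Dom_find_digit snailfish left → Spec_find_digit snailfish left (find_digit snailfish left)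

-- ===== LEMMAS AND PROOFS =====

-- if the head of the list (when any) is beyond a+1, the gap is immediate
lemma pv_gap_head (a : Int) (l : List Int) (h : ∀ b ∈ l, a + 1 < b) : pvFirstGap a l = a := by
  cases l with
  | nil => rfl
  | cons b rest =>
    have := h b (List.mem_cons_self)
    simp [pvFirstGap, show b ≠ a + 1 by omega]

-- A's loop in the some-state equals the gap scan over the remaining filtered positions
lemma pv_some (s : List Char) (mult : Int) :
    ∀ r j : Nat, r + j = s.length →
      pvLoopA s mult (PySem.List.pyRange (j : Int) (s.length : Int) 1) (some ((j : Int) - 1)) =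
        some (pvFirstGap ((j : Int) - 1)
          ((PySem.List.pyRange (j : Int) (s.length : Int) 1).filter
            (fun p => PySem.Chars.isdigit ((PySem.List.pyGet? s (p * mult)).getD ' ')))) := by
  intro r
  induction r with
  | zero =>
    intro j h
    rw [PySem.List.pyRange_one_eq_nil (by omega)]
    simp [pvLoopA, pvFirstGap]
  | succ r ih =>
    intro j h
    have hj : (j : Int) < (s.length : Int) := by exact_mod_cast (by omega : j < s.length)
    rw [PySem.List.pyRange_one_cons hj]
    by_cases hd : PySem.Chars.isdigit ((PySem.List.pyGet? s ((j : Int) * mult)).getD ' ') = true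
    · have hih := ih (j + 1) (by omega)
      push_cast at hih
      rw [show ((j : Int) + 1 - 1) = (j : Int) by ring] at hih
      simp only [pvLoopA, List.filter_cons, hd, if_pos, pvFirstGap]
      rw [if_neg (by simp), hih]
    · simp only [pvLoopA, List.filter_cons, hd]
      rw [if_neg (by simp [hd]), if_pos (by simp)]
      simp only [Bool.false_eq_true, if_false]
      rw [pv_gap_head]
      intro b hb
      have := (PySem.List.mem_pyRange_one.mp (List.mem_filter.mp hb).1).1
      omega

-- A's loop in the none-state equals B's filter-then-gap result
lemma pv_none (s : List Char) (mult : Int) :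
    ∀ r j : Nat, r + j = s.length →
      pvLoopA s mult (PySem.List.pyRange (j : Int) (s.length : Int) 1) none =
        (match (PySem.List.pyRange (j : Int) (s.length : Int) 1).filter
            (fun p => PySem.Chars.isdigit ((PySem.List.pyGet? s (p * mult)).getD ' ')) with
         | [] => none
         | a :: rest => some (pvFirstGap a rest)) := by
  intro r
  induction r with
  | zero =>
    intro j h
    rw [PySem.List.pyRange_one_eq_nil (by omega)]
    simp [pvLoopA]
  | succ r ih =>
    intro j h
    have hj : (j : Int) < (s.length : Int) := by exact_mod_cast (by omega : j < s.length)
    rw [PySem.List.pyRange_one_cons hj]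
    by_cases hd : PySem.Chars.isdigit ((PySem.List.pyGet? s ((j : Int) * mult)).getD ' ') = true
    · have hsome := pv_some s mult r (j + 1) (by omega)
      push_cast at hsome
      rw [show ((j : Int) + 1 - 1) = (j : Int) by ring] at hsome
      simp only [pvLoopA, List.filter_cons, hd, if_pos]
      rw [hsome]
    · have hih := ih (j + 1) (by omega)
      push_cast at hih
      simp only [pvLoopA, List.filter_cons, hd]
      rw [if_neg (by simp [hd]), if_neg (by simp)]
      simp only [Bool.false_eq_true, if_false]
      exact hih

-- ===== VERDICT (by name: the statement is the Claim_ definition above) =====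
theorem find_digit_spec : Claim_equal_find_digit := by
  intro snailfish left _
  unfold Spec_find_digit find_digit find_digit_alt
  set s := snailfish.toList with hs
  cases left
  · -- left = false: range(0, n)
    have h := pv_none s 1 s.length 0 (by omega)
    simpa using h
  · -- left = true: range(1, n)
    by_cases hn : s.length = 0
    · simp [hn, PySem.List.pyRange_one_eq_nil, pvLoopA]
    · have h := pv_none s (-1) (s.length - 1) 1 (by omega)
      simpa using h
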